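-- pv_equiv track=rewrite | github.com/joshanashakya/dissertation | workspace/dataset/java-python/GeeksForGeeks/2853/A/2.py | solve
-- ===== SOURCE A (Python) =====
-- def solveEven(s):
--
--     # If length is odd then return 2
--     if len(s) % 2 == 1:
--         return 2
--
--     # To check if half of palindromic
--     # string is itself a palindrome
--     ls = s[0 : len(s) // 2]
--     rs = s[len(s) // 2 : len(s)]
--
--     # If not then return 1
--     if ls != rs:
--         return 1
--
--     # Else call function with
--     # half palindromic string
--     return solveEven(ls)
--
-- def solveOdd(s):
--     return 2
--
-- def solve(s):
--
--     # If length is <=3 then it is impossible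
--     if len(s) <= 3:
--         return -1
--
--     # Array to store frequency of characters
--     cnt = [0] * 25
--
--     # Store count of characters in a array
--     for i in range(0, len(s)):
--         cnt[ord(s[i]) - ord('a')] += 1
--
--     # Condition for edge cases
--     if max(cnt) >= len(s) - 1:
--         return -1
--
--     # If length is even
--     if len(s) % 2 == 0:
--         return solveEven(s)
--
--     # If length is odd
--     if len(s) % 2 == 1:
--         return solveOdd(s)
-- ===== SOURCE B (Python) =====
-- def solve(s):
--     # Same guards as the original; counting done modulo 25 (one flat pass),
--     # and the recursive halving helpers replaced by an iterative halving loop.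
--     if len(s) <= 3:
--         return -1
--     cnt = [0] * 25
--     for ch in s:
--         cnt[(ord(ch) - ord('a')) % 25] += 1
--     if max(cnt) >= len(s) - 1:
--         return -1
--     if len(s) % 2 == 1:
--         return 2
--     t = s
--     while len(t) % 2 == 0:
--         h = len(t) // 2
--         if t[:h] != t[h:]:
--             return 1
--         t = t[:h]
--     return 2
-- ===== Notes on version B (the rewrite author's own statement) =====
-- stated objective: alternative
-- what changed: The recursive solveEven/solveOdd helpers are replaced by one iterative halving loop (odd length returns 2 immediately; while the length is even, compare the two halves and keep the left half), and the character counts are accumulated by a single explicit modulo-25 index instead of relying on negative-index wraparound.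
import Mathlib
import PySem

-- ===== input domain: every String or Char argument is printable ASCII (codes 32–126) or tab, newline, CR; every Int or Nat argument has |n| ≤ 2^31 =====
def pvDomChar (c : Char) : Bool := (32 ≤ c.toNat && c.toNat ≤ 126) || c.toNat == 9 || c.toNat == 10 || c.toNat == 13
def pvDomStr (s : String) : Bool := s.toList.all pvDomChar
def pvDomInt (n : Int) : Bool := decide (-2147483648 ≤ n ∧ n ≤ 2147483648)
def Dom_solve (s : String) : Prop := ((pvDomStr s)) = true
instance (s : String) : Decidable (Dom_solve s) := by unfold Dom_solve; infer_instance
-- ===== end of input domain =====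

-- B replaces A's recursive halving helpers by one iterative halving loop and counts
-- characters in a single modulo-25 pass; same value wherever A returns (objective: alternative decomposition).

-- ===== PORT A =====
-- recursive helper `solveEven`; fuel bounds the recursion depth (`s.length` is always enough
-- on the calls `solve` makes: each recursive call at least halves a nonempty list)
def solveEvenA : Nat → List Char → Int
  | 0, _ => 2
  | fuel + 1, s =>
    if s.length % 2 == 1 then 2
    else
      let ls := PySem.List.slice s (some 0) (some (PySem.Int.floordiv (s.length : Int) 2))
      let rs := PySem.List.slice s (some (PySem.Int.floordiv (s.length : Int) 2)) (some (s.length : Int))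
      if ls ≠ rs then 1 else solveEvenA fuel ls

def solveOddA (_s : List Char) : Int := 2

-- the counting loop `for i in range(len(s)): cnt[ord(s[i]) - ord('a')] += 1`
-- (none = the IndexError Python raises when the index falls outside [-25, 24])
def countA (s : List Char) : Option (List Int) :=
  s.foldl
    (fun acc c => acc.bind fun cnt =>
      match PySem.List.pyGet? cnt ((c.toNat : Int) - 97) with
      | none => none
      | some v => PySem.List.pySet? cnt ((c.toNat : Int) - 97) (v + 1))
    (some (List.replicate 25 (0 : Int)))

def solve (s : String) : Int :=
  let cs := s.toList
  if cs.length ≤ 3 then -1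
  else
    match countA cs with
    | none => 0  -- Python raises IndexError here; such inputs are excluded by Pre_solve
    | some cnt =>
      if ((PySem.List.max? cnt (fun x => x)).getD 0) ≥ (cs.length : Int) - 1 then -1
      else if cs.length % 2 == 0 then solveEvenA cs.length cs
      else solveOddA cs

-- ===== PORT B =====
-- B's counting pass: cnt[(ord(ch) - ord('a')) % 25] += 1  (index always in range)
def countB (s : List Char) : List Int :=
  s.foldl
    (fun cnt c =>
      PySem.List.pySetD cnt (PySem.Int.mod ((c.toNat : Int) - 97) 25)
        (PySem.List.pyGetD cnt (PySem.Int.mod ((c.toNat : Int) - 97) 25) 0 + 1))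
    (List.replicate 25 (0 : Int))

-- B's `while len(t) % 2 == 0` loop; fuel bounds the iteration count (t[:h] = take h, t[h:] = drop h)
def halveLoopB : Nat → List Char → Int
  | 0, _ => 2
  | fuel + 1, t =>
    if t.length % 2 == 0 then
      let h := t.length / 2
      if t.take h ≠ t.drop h then 1 else halveLoopB fuel (t.take h)
    else 2

def solve_alt (s : String) : Int :=
  let cs := s.toList
  if cs.length ≤ 3 then -1
  else
    let cnt := countB cs
    if ((PySem.List.max? cnt (fun x => x)).getD 0) ≥ (cs.length : Int) - 1 then -1
    else if cs.length % 2 == 1 then 2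
    else halveLoopB cs.length cs

-- ===== PRECONDITION & SPEC =====
-- Pre_ excludes exactly the inputs on which A raises IndexError: strings longer than 3 that
-- contain a character outside codes 72..121 (index ord(c)-97 outside the valid range [-25,24]
-- of the 25-slot list).
def Pre_solve (s : String) : Prop :=
  s.toList.length ≤ 3 ∨ s.toList.all (fun c => 72 ≤ c.toNat && c.toNat ≤ 121) = true
instance (s : String) : Decidable (Pre_solve s) := by unfold Pre_solve; infer_instance

def pvWitness_solve : String := "abab"

def Spec_solve (s : String) (out : Int) : Prop := out = solve_alt s
instance (s : String) (out : Int) : Decidable (Spec_solve s out) := by unfold Spec_solve; infer_instance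

-- ===== CLAIM (what is proved, stated in full; the proofs are below) =====
def Claim_equal_solve : Prop := ∀ (s : String), Dom_solve s → Pre_solve s → Spec_solve s (solve s)

-- ===== LEMMAS AND PROOFS =====

-- one counting step: A's raw index i ∈ [-25, 24] into a 25-slot list behaves exactly like
-- B's index i % 25
lemma stepAB {cnt : List Int} (h : cnt.length = 25) {i : Int} (h1 : -25 ≤ i) (h2 : i < 25) :
    (match PySem.List.pyGet? cnt i with
     | none => none
     | some v => PySem.List.pySet? cnt i (v + 1))
    = some (PySem.List.pySetD cnt (PySem.Int.mod i 25)
        (PySem.List.pyGetD cnt (PySem.Int.mod i 25) 0 + 1)) := by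
  have hm : PySem.Int.mod i 25 = i % 25 := PySem.Int.mod_eq_emod_of_pos (by norm_num)
  have hk : (i % 25).toNat < cnt.length := by
    rw [h]; omega
  have hidx : PySem.List.pyIdx? cnt.length i = some ((i % 25).toNat) := by
    rw [h]; unfold PySem.List.pyIdx?
    split_ifs <;> (try simp only [Option.some.injEq]) <;> omega
  have hidx' : PySem.List.pyIdx? cnt.length (i % 25) = some ((i % 25).toNat) := by
    rw [h]; unfold PySem.List.pyIdx?
    split_ifs <;> (try simp only [Option.some.injEq]) <;> omega
  simp [PySem.List.pyGet?, PySem.List.pySet?, PySem.List.pySetD, PySem.List.pyGetD,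
    hidx, hidx', List.getElem?_eq_getElem hk]

lemma length_countB_step (cnt : List Int) (i j : Int) :
    (PySem.List.pySetD cnt i j).length = cnt.length := by
  simp [PySem.List.pySetD, PySem.List.pySet?]
  cases hx : PySem.List.pyIdx? cnt.length i <;> simp

-- the two counting loops agree on every string whose characters lie in codes 72..121
lemma count_eq (s : List Char) (cnt : List Int) (hlen : cnt.length = 25)
    (hs : ∀ c ∈ s, 72 ≤ c.toNat ∧ c.toNat ≤ 121) :
    s.foldl
      (fun acc c => acc.bind fun cnt =>
        match PySem.List.pyGet? cnt ((c.toNat : Int) - 97) with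
        | none => none
        | some v => PySem.List.pySet? cnt ((c.toNat : Int) - 97) (v + 1))
      (some cnt)
    = some (s.foldl
        (fun cnt c =>
          PySem.List.pySetD cnt (PySem.Int.mod ((c.toNat : Int) - 97) 25)
            (PySem.List.pyGetD cnt (PySem.Int.mod ((c.toNat : Int) - 97) 25) 0 + 1))
        cnt) := by
  induction s generalizing cnt with
  | nil => simp
  | cons c t ih =>
    have hc := hs c (by simp)
    have h1 : -25 ≤ (c.toNat : Int) - 97 := by omega
    have h2 : (c.toNat : Int) - 97 < 25 := by omega
    simp only [List.foldl_cons, Option.bind_some]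
    rw [stepAB hlen h1 h2]
    exact ih _ (by rw [length_countB_step, hlen]) (fun x hx => hs x (by simp [hx]))

-- A's recursive solveEven equals B's iterative halving loop, fuel for fuel
lemma even_eq_loop (fuel : Nat) : ∀ t : List Char, solveEvenA fuel t = halveLoopB fuel t := by
  induction fuel with
  | zero => intro t; rfl
  | succ n ih =>
    intro t
    by_cases hodd : t.length % 2 = 1
    · simp [solveEvenA, halveLoopB, hodd]
    · have heven : t.length % 2 = 0 := by omega
      have hfd : PySem.Int.floordiv (t.length : Int) 2 = ((t.length / 2 : Nat) : Int) :=
        PySem.Int.floordiv_natCast t.length 2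
      have hls : PySem.List.slice t (some 0) (some (PySem.Int.floordiv (t.length : Int) 2))
          = t.take (t.length / 2) := by
        rw [hfd, PySem.List.slice_zero_start, PySem.List.slice_to_natCast]
      have hrs : PySem.List.slice t (some (PySem.Int.floordiv (t.length : Int) 2))
          (some (t.length : Int)) = t.drop (t.length / 2) := by
        rw [hfd, PySem.List.slice_natCast]
        exact List.take_of_length_le (by simp)
      simp only [solveEvenA, halveLoopB, heven, hls, hrs]
      simp only [beq_iff_eq]
      simp only [if_neg (by omega : ¬ (0 = 1))]
      by_cases hne : t.take (t.length / 2) = t.drop (t.length / 2)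
      · simp [hne, ih]
      · simp [hne]

-- ===== VERDICT (by name: the statement is the Claim_ definition above) =====
theorem solve_spec : Claim_equal_solve := by
  intro s _ hpre
  unfold Spec_solve solve solve_alt
  by_cases hlen : s.length ≤ 3
  · simp [hlen]
  · have hall : ∀ c ∈ s.toList, 72 ≤ c.toNat ∧ c.toNat ≤ 121 := by
      rcases hpre with h | h
      · exact absurd (by simpa using h) hlen
      · intro c hc
        simpa using List.all_eq_true.mp h c hc
    have hc : countA s.toList = some (countB s.toList) := by
      unfold countA countB
      exact count_eq s.toList _ (by simp) hall
    simp only [String.length_toList, hlen, hc]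
    by_cases hmax : ((s.length : Int) ≤ ((PySem.List.max? (countB s.toList) fun x => x).getD 0) + 1)
    · simp [hmax]
    · by_cases he : s.length % 2 = 0
      · simp [hmax, he, even_eq_loop]
      · simp [hmax, solveOddA, show s.length % 2 = 1 by omega]
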